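-- pv_equiv track=rewrite | github.com/oceangiri23/Smart_form_filler | OCR_NER/app/text_postprocess.py | interchange_position
-- ===== SOURCE A (Python) =====
-- def interchange_position(text):
--     D_target = ["B-DISTRICT","I-DISTRICT"]
--     W_target = ["B-WARD","I-WARD"]
--     NO_target = ["B-NO","I-NO"]
--     D_flag = 0
--     W_flag = 0
--     NO_flag = 0
--
--     new_words = []
--
--     for data,label in text:
--
--         if label in D_target and D_flag == 0:
--             label = "B-DISTRICT"
--             D_flag = 1
--
--         elif label in D_target and D_flag == 1:
--             label = "I-DISTRICT"
--
--         elif label in W_target and W_flag == 0: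
--             label = "B-WARD"
--             W_flag = 1
--
--         elif label in W_target and W_flag == 1:
--             label = "I-WARD"
--
--         elif label in NO_target and NO_flag < 2:
--             label = "B-NO"
--             NO_flag += 1
--
--         elif label in NO_target and NO_flag ==2:
--             label = "I-NO"
--
--         new_words.append((data,label))
--
--     return new_words
-- ===== SOURCE B (Python) =====
-- def interchange_position(text):
--     out = list(text)
--     for members, b, i, k in (
--         (("B-DISTRICT", "I-DISTRICT"), "B-DISTRICT", "I-DISTRICT", 1),
--         (("B-WARD", "I-WARD"), "B-WARD", "I-WARD", 1),
--         (("B-NO", "I-NO"), "B-NO", "I-NO", 2),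
--     ):
--         heads = [j for j, (_, lab) in enumerate(out) if lab in members][:k]
--         out = [(d, (b if j in heads else i) if lab in members else lab)
--                for j, (d, lab) in enumerate(out)]
--     return out
-- ===== Notes on version B (the rewrite author's own statement) =====
-- stated objective: alternative
-- what changed: Replaces A's single stateful pass with six if/elif flag branches by three staged passes, one per tag category: each pass first collects the positions of that category's first k occurrences (District/Ward k=1, NO k=2) and then rewrites the list positionally, emitting the B-label at those positions and the I-label at the category's other positions.
import Mathlib
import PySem

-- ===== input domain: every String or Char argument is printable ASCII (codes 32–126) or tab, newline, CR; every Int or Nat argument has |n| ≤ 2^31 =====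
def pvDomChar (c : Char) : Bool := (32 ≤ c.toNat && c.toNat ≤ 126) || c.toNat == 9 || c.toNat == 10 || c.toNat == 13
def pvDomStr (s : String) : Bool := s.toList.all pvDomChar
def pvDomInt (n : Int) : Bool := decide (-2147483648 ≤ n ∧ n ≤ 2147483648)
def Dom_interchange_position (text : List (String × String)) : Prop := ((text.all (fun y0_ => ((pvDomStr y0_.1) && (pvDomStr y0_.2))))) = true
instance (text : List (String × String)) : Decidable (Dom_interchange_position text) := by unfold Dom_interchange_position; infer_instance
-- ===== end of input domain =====

-- B replaces A's six-arm flag state machine by three staged passes (one per tag category):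
-- collect the positions of the category's first k members, then rewrite positionally (objective: alternative).

-- ===== PORT A =====
-- A's loop: flags D_flag, W_flag, NO_flag threaded through; appending becomes cons on the recursion.
def pvLoopA : List (String × String) → Int → Int → Int → List (String × String)
  | [], _, _, _ => []
  | (data, label) :: rest, dF, wF, nF =>
    if label ∈ ["B-DISTRICT", "I-DISTRICT"] ∧ dF = 0 then
      (data, "B-DISTRICT") :: pvLoopA rest 1 wF nF
    else if label ∈ ["B-DISTRICT", "I-DISTRICT"] ∧ dF = 1 then
      (data, "I-DISTRICT") :: pvLoopA rest dF wF nF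
    else if label ∈ ["B-WARD", "I-WARD"] ∧ wF = 0 then
      (data, "B-WARD") :: pvLoopA rest dF 1 nF
    else if label ∈ ["B-WARD", "I-WARD"] ∧ wF = 1 then
      (data, "I-WARD") :: pvLoopA rest dF wF nF
    else if label ∈ ["B-NO", "I-NO"] ∧ nF < 2 then
      (data, "B-NO") :: pvLoopA rest dF wF (nF + 1)
    else if label ∈ ["B-NO", "I-NO"] ∧ nF = 2 then
      (data, "I-NO") :: pvLoopA rest dF wF nF
    else
      (data, label) :: pvLoopA rest dF wF nF

def interchange_position (text : List (String × String)) : List (String × String) :=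
  pvLoopA text 0 0 0

-- ===== PORT B =====
-- the comprehension [j for j,(_,lab) in enumerate(out) if lab in members] (general start offset)
def pvIdxs (members : List String) (out : List (String × String)) (n : Int) : List Int :=
  (PySem.List.enumerate out n).filterMap (fun ji => if ji.2.2 ∈ members then some ji.1 else none)

-- one iteration of B's for-loop over the three configurations
def pvPass (members : List String) (b i : String) (k : Int) (out : List (String × String)) : List (String × String) :=
  let heads := PySem.List.slice (pvIdxs members out 0) none (some k)   -- [...][:k]
  (PySem.List.enumerate out 0).map
    (fun ji => (ji.2.1, if ji.2.2 ∈ members then (if ji.1 ∈ heads then b else i) else ji.2.2))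

def interchange_position_alt (text : List (String × String)) : List (String × String) :=
  [(["B-DISTRICT", "I-DISTRICT"], "B-DISTRICT", "I-DISTRICT", (1 : Int)),
   (["B-WARD", "I-WARD"], "B-WARD", "I-WARD", (1 : Int)),
   (["B-NO", "I-NO"], "B-NO", "I-NO", (2 : Int))].foldl
    (fun out cfg => pvPass cfg.1 cfg.2.1 cfg.2.2.1 cfg.2.2.2 out) text

-- ===== PRECONDITION & SPEC =====
def Spec_interchange_position (text : List (String × String)) (out : List (String × String)) : Prop := out = interchange_position_alt text
instance (text : List (String × String)) (out : List (String × String)) : Decidable (Spec_interchange_position text out) := by unfold Spec_interchange_position; infer_instance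

-- ===== CLAIM =====
def Claim_equal_interchange_position : Prop := ∀ (text : List (String × String)), Dom_interchange_position text → Spec_interchange_position text (interchange_position text)

-- ===== LEMMAS AND PROOFS =====
-- Reference single pass with an explicit occurrence counter: the c-th member onward of M
-- gets b while c < k, i afterwards; non-members unchanged.
def countPass (M : List String) (b i : String) (k : Nat) : Nat → List (String × String) → List (String × String)
  | _, [] => []
  | c, (d, l) :: r =>
    if l ∈ M then (d, if c < k then b else i) :: countPass M b i k (c + 1) r
    else (d, l) :: countPass M b i k c r

-- B's positional pass equals the counter pass: pre holds the member positions already consumed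
-- (all to the left of the enumerate offset n), c their number.
lemma idx_eq_count (M : List String) (b i : String) (k : Nat) :
    ∀ (xs : List (String × String)) (n : Int) (c : Nat) (pre : List Int),
    (∀ x ∈ pre, x < n) →
    (PySem.List.enumerate xs n).map
      (fun ji => (ji.2.1, if ji.2.2 ∈ M then
          (if ji.1 ∈ pre ++ (pvIdxs M xs n).take (k - c) then b else i) else ji.2.2))
    = countPass M b i k c xs := by
  intro xs
  induction xs with
  | nil => intro n c pre _; simp [PySem.List.enumerate_nil, countPass]
  | cons p rest ih =>
    obtain ⟨d, l⟩ := p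
    intro n c pre hpre
    have hnpre : n ∉ pre := fun h => absurd (hpre n h) (by omega)
    by_cases hm : l ∈ M
    · have hidx : pvIdxs M ((d, l) :: rest) n = n :: pvIdxs M rest (n + 1) := by
        simp [pvIdxs, PySem.List.enumerate_cons, hm]
      rcases Nat.lt_or_ge c k with hc | hc
      · have htake : (pvIdxs M ((d, l) :: rest) n).take (k - c)
            = n :: (pvIdxs M rest (n + 1)).take (k - (c + 1)) := by
          rw [hidx, show k - c = (k - (c + 1)) + 1 by omega, List.take_succ_cons]
        have ih' := ih (n + 1) (c + 1) (pre ++ [n])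
          (by intro x hx; rcases List.mem_append.1 hx with h | h
              · exact lt_trans (hpre x h) (by omega)
              · simp at h; omega)
        rw [List.append_assoc] at ih'
        simp only [PySem.List.enumerate_cons, List.map_cons, countPass, htake,
          if_pos hm, if_pos hc, List.cons.injEq]
        refine ⟨by simp, ?_⟩
        simp only [List.singleton_append] at ih'
        exact ih'
      · have htake : (pvIdxs M ((d, l) :: rest) n).take (k - c) = [] := by
          rw [show k - c = 0 by omega]; rfl
        have htake' : (pvIdxs M rest (n + 1)).take (k - (c + 1)) = [] := by
          rw [show k - (c + 1) = 0 by omega]; rfl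
        have ih' := ih (n + 1) (c + 1) pre
          (fun x hx => lt_trans (hpre x hx) (by omega))
        rw [htake'] at ih'
        simp only [PySem.List.enumerate_cons, List.map_cons, countPass, htake,
          if_pos hm, if_neg (by omega : ¬ c < k), List.cons.injEq]
        refine ⟨by simp [hnpre], by simpa using ih'⟩
    · have hidx : pvIdxs M ((d, l) :: rest) n = pvIdxs M rest (n + 1) := by
        simp [pvIdxs, PySem.List.enumerate_cons, hm]
      have ih' := ih (n + 1) c pre (fun x hx => lt_trans (hpre x hx) (by omega))
      simp only [PySem.List.enumerate_cons, List.map_cons, countPass, hidx, if_neg hm,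
        List.cons.injEq]
      exact ⟨by simp, ih'⟩

lemma pvPass_eq (M : List String) (b i : String) (kN : Nat) (xs : List (String × String)) :
    pvPass M b i (kN : Int) xs = countPass M b i kN 0 xs := by
  have hslice : PySem.List.slice (pvIdxs M xs 0) none (some (kN : Int))
      = (pvIdxs M xs 0).take kN := by
    rw [PySem.List.slice_to]
    · simp
    · positivity
  have h := idx_eq_count M b i kN xs 0 0 [] (by intro x hx; simp at hx)
  simpa [pvPass, hslice] using h

-- A's interleaved loop equals the composition of the three counter passes
-- (flags: D/W flag = whether the count is 0; NO flag = min count 2).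
lemma loopA_eq : ∀ (xs : List (String × String)) (cD cW cN : Nat),
    pvLoopA xs (if cD = 0 then 0 else 1) (if cW = 0 then 0 else 1) (min (cN : Int) 2)
    = countPass ["B-NO", "I-NO"] "B-NO" "I-NO" 2 cN
        (countPass ["B-WARD", "I-WARD"] "B-WARD" "I-WARD" 1 cW
          (countPass ["B-DISTRICT", "I-DISTRICT"] "B-DISTRICT" "I-DISTRICT" 1 cD xs)) := by
  intro xs
  induction xs with
  | nil => intro _ _ _; rfl
  | cons p rest ih =>
    obtain ⟨data, label⟩ := p
    intro cD cW cN
    by_cases hd : label = "B-DISTRICT" ∨ label = "I-DISTRICT"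
    · have hmem : label ∈ ["B-DISTRICT", "I-DISTRICT"] := by
        rcases hd with h | h <;> simp [h]
      rcases Nat.eq_zero_or_pos cD with h0 | h0
      · subst h0
        simp only [countPass, if_pos hmem, if_pos (by omega : 0 < 1)]
        simp only [countPass, show ("B-DISTRICT" : String) ∉ ["B-WARD", "I-WARD"] by decide,
          show ("B-DISTRICT" : String) ∉ ["B-NO", "I-NO"] by decide, ite_false]
        have := ih 1 cW cN
        rw [if_neg (by omega : ¬ (1:ℕ) = 0)] at this
        simp only [pvLoopA, hmem]
        simp [this]
      · simp only [countPass, if_pos hmem, if_neg (by omega : ¬ cD < 1)]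
        simp only [countPass, show ("I-DISTRICT" : String) ∉ ["B-WARD", "I-WARD"] by decide,
          show ("I-DISTRICT" : String) ∉ ["B-NO", "I-NO"] by decide, ite_false]
        have := ih (cD + 1) cW cN
        rw [if_neg (by omega : ¬ cD + 1 = 0)] at this
        simp only [pvLoopA, hmem]
        simp [show ¬ cD = 0 by omega, this]
    · by_cases hw : label = "B-WARD" ∨ label = "I-WARD"
      · have hmem : label ∈ ["B-WARD", "I-WARD"] := by
          rcases hw with h | h <;> simp [h]
        have hnd : label ∉ ["B-DISTRICT", "I-DISTRICT"] := by simpa using hd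
        rcases Nat.eq_zero_or_pos cW with h0 | h0
        · subst h0
          simp only [countPass, if_neg hnd, if_pos hmem, if_pos (by omega : 0 < 1),
            show ("B-WARD" : String) ∉ ["B-NO", "I-NO"] by decide, ite_false]
          have := ih cD 1 cN
          rw [if_neg (by omega : ¬ (1:ℕ) = 0)] at this
          simp only [pvLoopA, hmem, hnd]
          simp [this]
        · simp only [countPass, if_neg hnd, if_pos hmem, if_neg (by omega : ¬ cW < 1),
            show ("I-WARD" : String) ∉ ["B-NO", "I-NO"] by decide, ite_false]
          have := ih cD (cW + 1) cN
          rw [if_neg (by omega : ¬ cW + 1 = 0)] at this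
          simp only [pvLoopA, hmem, hnd]
          simp [show ¬ cW = 0 by omega, this]
      · by_cases hn : label = "B-NO" ∨ label = "I-NO"
        · have hmem : label ∈ ["B-NO", "I-NO"] := by
            rcases hn with h | h <;> simp [h]
          have hnd : label ∉ ["B-DISTRICT", "I-DISTRICT"] := by simpa using hd
          have hnw : label ∉ ["B-WARD", "I-WARD"] := by simpa using hw
          rcases Nat.lt_or_ge cN 2 with h0 | h0
          · simp only [countPass, if_neg hnd, if_neg hnw, if_pos hmem, if_pos h0]
            have := ih cD cW (cN + 1)
            push_cast at this
            simp only [pvLoopA, hmem, hnd, hnw]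
            simp [this, show min ((cN : Int)) 2 + 1 = min ((cN : Int) + 1) 2 by omega,
              show min ((cN : Int)) 2 < 2 by omega]
          · simp only [countPass, if_neg hnd, if_neg hnw, if_pos hmem, if_neg (by omega : ¬ cN < 2)]
            have := ih cD cW (cN + 1)
            push_cast at this
            rw [show min ((cN : Int) + 1) 2 = 2 by omega] at this
            simp only [pvLoopA, hmem, hnd, hnw]
            simp [this, show min ((cN : Int)) 2 = 2 by omega]
        · have hnd : label ∉ ["B-DISTRICT", "I-DISTRICT"] := by simpa using hd
          have hnw : label ∉ ["B-WARD", "I-WARD"] := by simpa using hw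
          have hnn : label ∉ ["B-NO", "I-NO"] := by simpa using hn
          have := ih cD cW cN
          simp only [countPass, if_neg hnd, if_neg hnw, if_neg hnn, pvLoopA]
          simp [hnd, hnw, hnn, this]

-- ===== VERDICT =====
theorem interchange_position_spec : Claim_equal_interchange_position := by
  intro text _
  show _ = _
  have hA := loopA_eq text 0 0 0
  calc interchange_position text
      = pvLoopA text 0 0 0 := rfl
    _ = countPass ["B-NO", "I-NO"] "B-NO" "I-NO" 2 0
          (countPass ["B-WARD", "I-WARD"] "B-WARD" "I-WARD" 1 0
            (countPass ["B-DISTRICT", "I-DISTRICT"] "B-DISTRICT" "I-DISTRICT" 1 0 text)) := by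
          simpa using hA
    _ = interchange_position_alt text := by
          simp only [interchange_position_alt, List.foldl]
          rw [show ((1 : Int)) = ((1 : Nat) : Int) by norm_num,
            show ((2 : Int)) = ((2 : Nat) : Int) by norm_num]
          rw [pvPass_eq, pvPass_eq, pvPass_eq]
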